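-- pv_equiv track=rewrite | github.com/pvegdahl/AdventOfCode2021 | src/day11.py | increment_target_cells
-- ===== SOURCE A (Python) =====
-- from typing import List, Tuple, Set
--
-- def increment_target_cells(
--     matrix: List[List[int]], target_cells: Set[Tuple[int, int]]
-- ) -> List[List[int]]:
--     result = []
--     for i in range(len(matrix)):
--         new_row = []
--         for j in range(len(matrix[i])):
--             new_value = matrix[i][j]
--             if (i, j) in target_cells:
--                 new_value += 1
--             new_row.append(new_value)
--         result.append(new_row)
--     return result
-- ===== SOURCE B (Python) =====
-- def increment_target_cells(matrix, target_cells):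
--     result = [list(row) for row in matrix]
--     n = len(result)
--     for i, j in target_cells:
--         if 0 <= i < n and 0 <= j < len(result[i]):
--             result[i][j] += 1
--     return result
-- ===== Notes on version B (the rewrite author's own statement) =====
-- stated objective: faster
-- what changed: B copies the matrix once and lets the target set drive the updates (one bounds-guarded increment per target cell) instead of testing set membership for every grid cell.
import Mathlib
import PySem

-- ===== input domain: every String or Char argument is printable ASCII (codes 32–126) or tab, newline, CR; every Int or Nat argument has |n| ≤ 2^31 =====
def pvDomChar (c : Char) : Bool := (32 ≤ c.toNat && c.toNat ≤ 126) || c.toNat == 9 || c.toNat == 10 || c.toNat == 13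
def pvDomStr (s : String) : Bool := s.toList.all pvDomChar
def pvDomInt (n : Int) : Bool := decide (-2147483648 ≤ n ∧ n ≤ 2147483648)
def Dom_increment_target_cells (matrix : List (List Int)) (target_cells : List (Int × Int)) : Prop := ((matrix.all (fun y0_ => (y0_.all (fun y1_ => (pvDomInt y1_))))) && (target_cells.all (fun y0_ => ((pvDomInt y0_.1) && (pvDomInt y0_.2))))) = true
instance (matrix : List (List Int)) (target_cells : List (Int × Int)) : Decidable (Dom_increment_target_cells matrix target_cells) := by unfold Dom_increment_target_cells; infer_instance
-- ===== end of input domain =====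

-- B copies the matrix once and lets the target set drive the bounds-guarded updates, instead of
-- testing set membership for every grid cell as A does.

-- ===== PORT A =====
def increment_target_cells (matrix : List (List Int)) (target_cells : List (Int × Int)) : List (List Int) :=
  (List.range matrix.length).foldl (fun result i =>
    result ++ [(List.range (matrix.getD i []).length).foldl (fun new_row j =>
      let new_value := (matrix.getD i []).getD j 0
      let new_value := if ((i : Int), (j : Int)) ∈ target_cells then new_value + 1 else new_value
      new_row ++ [new_value]) []]) []

-- ===== PORT B =====
-- one bounds-guarded in-place increment of the copied matrix per target cell
def pvBumpCell (result : List (List Int)) (ij : Int × Int) : List (List Int) :=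
  if 0 ≤ ij.1 ∧ ij.1 < (result.length : Int) ∧ 0 ≤ ij.2 ∧ ij.2 < ((result.getD ij.1.toNat []).length : Int) then
    result.set ij.1.toNat
      ((result.getD ij.1.toNat []).set ij.2.toNat ((result.getD ij.1.toNat []).getD ij.2.toNat 0 + 1))
  else result

def increment_target_cells_alt (matrix : List (List Int)) (target_cells : List (Int × Int)) : List (List Int) :=
  target_cells.foldl pvBumpCell (matrix.map (fun row => row))

-- ===== PRECONDITION & SPEC =====
-- target_cells is a Python set: its list representation holds distinct elements (type convention).
def Pre_increment_target_cells (matrix : List (List Int)) (target_cells : List (Int × Int)) : Prop :=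
  target_cells.Nodup
instance (matrix : List (List Int)) (target_cells : List (Int × Int)) : Decidable (Pre_increment_target_cells matrix target_cells) := by unfold Pre_increment_target_cells; infer_instance
def pvWitness_increment_target_cells : List (List Int) × (List (Int × Int)) :=
  ([[1, 2], [3, 4]], [(0, 1), (1, 0), (5, 5)])

def Spec_increment_target_cells (matrix : List (List Int)) (target_cells : List (Int × Int)) (out : List (List Int)) : Prop := out = increment_target_cells_alt matrix target_cells
instance (matrix : List (List Int)) (target_cells : List (Int × Int)) (out : List (List Int)) : Decidable (Spec_increment_target_cells matrix target_cells out) := by unfold Spec_increment_target_cells; infer_instance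

-- ===== CLAIM (what is proved, stated in full; the proofs are below) =====
def Claim_equal_increment_target_cells : Prop := ∀ (matrix : List (List Int)) (target_cells : List (Int × Int)), Dom_increment_target_cells matrix target_cells → Pre_increment_target_cells matrix target_cells → Spec_increment_target_cells matrix target_cells (increment_target_cells matrix target_cells)

-- ===== LEMMAS AND PROOFS =====

-- one bump preserves the outer length
theorem pvBump_length (m : List (List Int)) (t : Int × Int) :
    (pvBumpCell m t).length = m.length := by
  unfold pvBumpCell; split <;> simp

-- one bump preserves every row length
theorem pvBump_rowlen (m : List (List Int)) (t : Int × Int) (i : Nat) :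
    ((pvBumpCell m t).getD i []).length = (m.getD i []).length := by
  unfold pvBumpCell
  split
  · rename_i h
    rcases Nat.decEq t.1.toNat i with hne | heq
    · simp [List.getD, List.getElem?_set_ne hne]
    · subst heq
      have hlt : t.1.toNat < m.length := by omega
      simp [List.getD, hlt]
  · rfl

-- one bump adds 1 to the named cell and nothing else (in-bounds cells)
theorem pvBump_entry (m : List (List Int)) (t : Int × Int) (i j : Nat)
    (hi : i < m.length) (hj : j < (m.getD i []).length) :
    ((pvBumpCell m t).getD i []).getD j 0
      = (m.getD i []).getD j 0 + (if t = ((i : Int), (j : Int)) then 1 else 0) := by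
  unfold pvBumpCell
  by_cases heq : t = ((i : Int), (j : Int))
  · subst heq
    simp only [Int.toNat_natCast]
    have hguard : (0 : Int) ≤ (i : Int) ∧ (i : Int) < (m.length : Int) ∧
        (0 : Int) ≤ (j : Int) ∧ (j : Int) < ((m.getD i []).length : Int) := by
      refine ⟨by omega, by exact_mod_cast hi, by omega, by exact_mod_cast hj⟩
    rw [if_pos hguard]
    have hj' : j < (m[i]'hi).length := by simpa [List.getD, List.getElem?_eq_getElem hi] using hj
    simp [List.getD, hi, hj']
  · rw [if_neg heq]
    split
    · rename_i h
      rcases Nat.decEq t.1.toNat i with hne | hieq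
      · simp [List.getD, List.getElem?_set_ne hne]
      · subst hieq
        have hlt : t.1.toNat < m.length := by omega
        have hjne : t.2.toNat ≠ j := by
          intro hc
          apply heq
          have h1 : t.1 = ((t.1.toNat : Nat) : Int) := by omega
          have h2 : t.2 = ((j : Nat) : Int) := by omega
          exact Prod.ext h1 h2
        simp [List.getD, hlt, List.getElem?_set_ne hjne]
    · simp

-- the fold of B preserves the outer length
theorem pvBump_foldl_length (ts : List (Int × Int)) (m : List (List Int)) :
    (ts.foldl pvBumpCell m).length = m.length := by
  induction ts generalizing m with
  | nil => rfl
  | cons t ts ih => simp only [List.foldl_cons]; rw [ih, pvBump_length]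

-- the fold of B preserves every row length
theorem pvBump_foldl_rowlen (ts : List (Int × Int)) (m : List (List Int)) (i : Nat) :
    ((ts.foldl pvBumpCell m).getD i []).length = (m.getD i []).length := by
  induction ts generalizing m with
  | nil => rfl
  | cons t ts ih => simp only [List.foldl_cons]; rw [ih, pvBump_rowlen]

-- entry characterisation of B's fold: each in-bounds entry gains the multiplicity of its cell
theorem pvBump_foldl_entry (ts : List (Int × Int)) (m : List (List Int)) (i j : Nat)
    (hi : i < m.length) (hj : j < (m.getD i []).length) :
    ((ts.foldl pvBumpCell m).getD i []).getD j 0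
      = (m.getD i []).getD j 0 + ts.count ((i : Int), (j : Int)) := by
  induction ts generalizing m with
  | nil => simp
  | cons t ts ih =>
    simp only [List.foldl_cons]
    have hi' : i < (pvBumpCell m t).length := by rw [pvBump_length]; exact hi
    have hj' : j < ((pvBumpCell m t).getD i []).length := by rw [pvBump_rowlen]; exact hj
    rw [ih _ hi' hj', pvBump_entry m t i j hi hj, List.count_cons]
    by_cases heq : t = ((i : Int), (j : Int))
    · simp [heq]; omega
    · simp [heq]

theorem increment_target_cells_spec : Claim_equal_increment_target_cells := by
  intro matrix ts _hdom hpre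
  unfold Spec_increment_target_cells increment_target_cells increment_target_cells_alt
  rw [PySem.List.foldl_append_singleton_eq_map]
  have hm : matrix.map (fun row => row) = matrix := by simp
  rw [hm]
  simp only [List.nil_append]
  apply List.ext_getElem
  · simp [pvBump_foldl_length]
  · intro i hiA hiB
    have hi : i < matrix.length := by simpa [pvBump_foldl_length] using hiB
    rw [List.getElem_map, List.getElem_range,
      PySem.List.foldl_append_singleton_eq_map]
    simp only [List.nil_append]
    have hBrow : (List.foldl pvBumpCell matrix ts)[i] = (List.foldl pvBumpCell matrix ts).getD i [] :=
      (List.getD_eq_getElem _ _ hiB).symm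
    rw [hBrow]
    apply List.ext_getElem
    · simp only [List.length_map, List.length_range]
      simpa only [List.getD] using (pvBump_foldl_rowlen ts matrix i).symm
    · intro j hjA hjB
      have hjB' : j < ((List.foldl pvBumpCell matrix ts).getD i []).length := hjB
      have hj : j < (matrix.getD i []).length := by
        have h := hjB'; rw [pvBump_foldl_rowlen] at h; exact h
      have hBent : ((List.foldl pvBumpCell matrix ts).getD i []).getD j 0
          = ((List.foldl pvBumpCell matrix ts).getD i [])[j] := List.getD_eq_getElem _ _ hjB'
      rw [List.getElem_map, List.getElem_range, ← hBent,
        pvBump_foldl_entry ts matrix i j hi hj]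
      by_cases hmem : ((i : Int), (j : Int)) ∈ ts
      · rw [List.count_eq_one_of_mem hpre hmem]
        simp [hmem]
      · rw [List.count_eq_zero.mpr hmem]
        simp [hmem]
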